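-- pv_equiv track=rewrite | github.com/joshanashakya/dissertation | workspace/dataset/java-python/GeeksForGeeks/3938/A/2.py | numofArray
-- ===== SOURCE A (Python) =====
-- MAX = 1000
--
-- def numofArray(n, m):
--
--     dp = [[0 for i in range(MAX)] for j in range(MAX)]
--
--     # For storing factors.
--     di = [[] for i in range(MAX)]
--
--     # For storing multiples.
--     mu = [[] for i in range(MAX)]
--
--     # calculating the factors and multiples
--     # of elements [1...m].
--     for i in range(1, m+1):
--
--         for j in range(2*i, m+1, i):
--
--             di[j].append(i)
--             mu[i].append(j)
--
--         di[i].append(i)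
--
--     # Initalising for size 1 array for each i <= m.
--     for i in range(1, m+1):
--         dp[1][i] = 1
--
--     # Calculating the number of array possible
--     # of size i and starting with j.
--     for i in range(2, n+1):
--
--         for j in range(1, m+1):
--
--             dp[i][j] = 0
--
--             # For all previous possible values.
--             # Adding number of factors.
--             for x in di[j]:
--                 dp[i][j] += dp[i-1][x]
--
--             # Adding number of multiple.
--             for x in mu[j]:
--                 dp[i][j] += dp[i-1][x]
--
--     # Calculating the total count of array
--     # which start from [1...m].
--     ans = 0
--     for i in range(1, m+1):
--
--         ans += dp[n][i]
--         di[i].clear()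
--         mu[i].clear()
--
--     return ans
-- ===== SOURCE B (Python) =====
-- def numofArray(n, m):
--     # Rolling 1-D vector DP; neighbours found by sqrt divisor-pair enumeration,
--     # each divisor pair updates both sides symmetrically (no adjacency tables, no 2-D dp).
--     if n <= 0 or m <= 0:
--         return 0
--     v = [1] * (m + 1)
--     for _ in range(n - 1):
--         w = v[:]
--         for j in range(1, m + 1):
--             d = 1
--             while d * d <= j:
--                 if j % d == 0:
--                     e = j // d
--                     if d != j:
--                         w[j] += v[d]
--                         w[d] += v[j]
--                     if e != d and e != j:
--                         w[j] += v[e]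
--                         w[e] += v[j]
--                 d += 1
--         v = w
--     total = 0
--     for c in range(1, m + 1):
--         total += v[c]
--     return total
-- ===== Notes on version B (the rewrite author's own statement) =====
-- stated objective: alternative
-- what changed: B drops A's MAX x MAX dp table and its sieve-built divisor/multiple adjacency lists (di/mu) and instead iterates a rolling 1-D vector, finding each value's neighbours on the fly by trial-division divisor-pair enumeration up to sqrt(j), updating both sides of every divisor pair symmetrically.
-- intended difference: On n = -999 with 1 <= m (<= 999), A returns m because dp[n] wraps around by Python negative indexing to the initialised row dp[1]; B returns 0, the intended count since there are no arrays of negative length. — e.g. on numofArray(-999, 1): A returns 1, B returns 0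
import Mathlib
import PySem

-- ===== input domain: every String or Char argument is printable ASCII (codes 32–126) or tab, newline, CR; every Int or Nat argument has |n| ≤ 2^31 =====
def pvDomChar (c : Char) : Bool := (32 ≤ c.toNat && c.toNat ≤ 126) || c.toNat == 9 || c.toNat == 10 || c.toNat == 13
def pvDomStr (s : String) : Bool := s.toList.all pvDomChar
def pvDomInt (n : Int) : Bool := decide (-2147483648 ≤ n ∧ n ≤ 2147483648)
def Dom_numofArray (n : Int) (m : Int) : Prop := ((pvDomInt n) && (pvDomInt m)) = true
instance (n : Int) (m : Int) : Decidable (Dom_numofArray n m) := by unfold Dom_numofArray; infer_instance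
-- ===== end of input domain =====

-- B replaces A's sieve-built divisor/multiple adjacency tables (di/mu) and its MAX×MAX pull DP
-- with a rolling 1-D vector whose neighbours are enumerated on the fly by trial division up to
-- sqrt(j), each divisor pair updating both of its cells symmetrically (objective: alternative).

-- Shared low-level helpers mirroring Python's subscripts.
-- The di/mu tables stay lists (PySem semantics); dp matrices/vectors are ported as Array Int /
-- Array (Array Int) for evaluation speed, with Python's list indexing (negative index = from
-- the end) hand-ported in pyIdx/rget/rset/aget/aset: exact for -len ≤ index < len, which covers
-- every access the ports make on inputs satisfying Pre_ (reads/writes in the loops use indices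
-- in [0, 999] resp. [0, m]; A's final dp[n] read uses -1000 ≤ n ≤ 999).
def lget (t : List (List Int)) (i : Int) : List Int := PySem.List.pyGetD t i []
def lset (t : List (List Int)) (i : Int) (r : List Int) : List (List Int) := PySem.List.pySetD t i r
def pyIdx (n : Nat) (i : Int) : Nat := if i < 0 then (i + n).toNat else i.toNat
def aget (t : Array (Array Int)) (i : Int) : Array Int := t[pyIdx t.size i]?.getD #[]
def aset (t : Array (Array Int)) (i : Int) (r : Array Int) : Array (Array Int) :=
  if h : pyIdx t.size i < t.size then t.set (pyIdx t.size i) r h else t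
def rget (r : Array Int) (j : Int) : Int := r[pyIdx r.size j]?.getD 0
def rset (r : Array Int) (j : Int) (v : Int) : Array Int :=
  if h : pyIdx r.size j < r.size then r.set (pyIdx r.size j) v h else r
def tget (t : Array (Array Int)) (i j : Int) : Int := rget (aget t i) j
def tset (t : Array (Array Int)) (i j : Int) (v : Int) : Array (Array Int) :=
  aset t i (rset (aget t i) j v)

-- ===== PORT A =====
def numofArray (n : Int) (m : Int) : Int :=
  let dp : Array (Array Int) := Array.replicate 1000 (Array.replicate 1000 0)
  let di : List (List Int) := List.replicate 1000 []
  let mu : List (List Int) := List.replicate 1000 []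
  let dm := (PySem.List.pyRange 1 (m+1) 1).foldl (fun (p : List (List Int) × List (List Int)) i =>
      let p := (PySem.List.pyRange (2*i) (m+1) i).foldl
          (fun (q : List (List Int) × List (List Int)) j =>
            (lset q.1 j (lget q.1 j ++ [i]), lset q.2 i (lget q.2 i ++ [j]))) p
      (lset p.1 i (lget p.1 i ++ [i]), p.2)) (di, mu)
  let di := dm.1
  let mu := dm.2
  let dp := (PySem.List.pyRange 1 (m+1) 1).foldl (fun dp i => tset dp 1 i 1) dp
  let dp := (PySem.List.pyRange 2 (n+1) 1).foldl (fun dp i =>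
      (PySem.List.pyRange 1 (m+1) 1).foldl (fun dp j =>
        let dp := tset dp i j 0
        let dp := (lget di j).foldl (fun dp x => tset dp i j (tget dp i j + tget dp (i-1) x)) dp
        (lget mu j).foldl (fun dp x => tset dp i j (tget dp i j + tget dp (i-1) x)) dp) dp) dp
  let fin := (PySem.List.pyRange 1 (m+1) 1).foldl
      (fun (s : Int × List (List Int) × List (List Int)) i =>
        (s.1 + tget dp n i, lset s.2.1 i [], lset s.2.2 i [])) (0, di, mu)
  fin.1

-- ===== PORT B =====
-- needed by bInner's termination argument (cited by name in decreasing_by)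
theorem le_mul_self_int (d : Int) : d ≤ d * d := by nlinarith [sq_nonneg (d - 1), sq_nonneg d]

-- Python's  `while d * d <= j:` body (trial division; e = j // d is the cofactor)
def bInner (v : Array Int) (j : Int) (w : Array Int) (d : Int) : Array Int :=
  if h : d * d ≤ j then
    let w1 :=
      if PySem.Int.mod j d = 0 then
        let e := PySem.Int.floordiv j d
        let w2 :=
          if d ≠ j then
            let wa := rset w j (rget w j + rget v d)
            rset wa d (rget wa d + rget v j)
          else w
        if e ≠ d ∧ e ≠ j then
          let wb := rset w2 j (rget w2 j + rget v e)
          rset wb e (rget wb e + rget v j)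
        else w2
      else w
    bInner v j w1 (d + 1)
  else w
termination_by (j + 1 - d).toNat
decreasing_by
  have hd : d ≤ j := le_trans (le_mul_self_int d) h
  omega

-- one DP layer: w = v[:], then the j-loop with the while-loop starting at d = 1
def bLayer (m : Int) (v : Array Int) : Array Int :=
  (PySem.List.pyRange 1 (m+1) 1).foldl (fun w j => bInner v j w 1) v

def numofArray_alt (n : Int) (m : Int) : Int :=
  if n ≤ 0 ∨ m ≤ 0 then 0
  else
    let v := Array.replicate (m+1).toNat 1
    let v := (PySem.List.pyRange 0 (n-1) 1).foldl (fun v _ => bLayer m v) v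
    (PySem.List.pyRange 1 (m+1) 1).foldl (fun total c => total + rget v c) 0

-- ===== PRECONDITION & SPEC =====
-- Pre_ is exactly the set of inputs on which A returns normally: it excludes only the inputs
-- where A raises IndexError on its fixed 1000-entry tables (m ≥ 1000, or 1 ≤ m with n ≥ 1000
-- hitting dp[i], or 1 ≤ m with n < -1000 hitting dp[n]).
def Pre_numofArray (n : Int) (m : Int) : Prop := m ≤ 999 ∧ (1 ≤ m → -1000 ≤ n ∧ n ≤ 999)
instance (n : Int) (m : Int) : Decidable (Pre_numofArray n m) := by
  unfold Pre_numofArray; infer_instance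
def pvWitness_numofArray : Int × Int := (3, 3)

-- On n = -999 with 1 ≤ m, A returns m because Python's negative indexing makes dp[n] wrap
-- around to the initialised row dp[1]; B returns 0, the intended count since no array has
-- negative length.
def D_numofArray (n : Int) (m : Int) : Prop := n = -999 ∧ 1 ≤ m
instance (n : Int) (m : Int) : Decidable (D_numofArray n m) := by
  unfold D_numofArray; infer_instance

def Spec_numofArray (n : Int) (m : Int) (out : Int) : Prop :=
  ¬ D_numofArray n m → out = numofArray_alt n m
instance (n : Int) (m : Int) (out : Int) : Decidable (Spec_numofArray n m out) := by
  unfold Spec_numofArray; infer_instance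

def pvDiffWitness_numofArray : Int × Int := (-999, 1)
def pvDiffWitnessOut_numofArray : Int × Int := (1, 0)

-- ===== CLAIM (what is proved, stated in full; the proofs are below) =====
def Claim_unchanged_numofArray : Prop :=
  ∀ (n : Int) (m : Int), Dom_numofArray n m → Pre_numofArray n m →
    Spec_numofArray n m (numofArray n m)
def Claim_changed_numofArray : Prop :=
  Dom_numofArray (pvDiffWitness_numofArray.1) (pvDiffWitness_numofArray.2) ∧
  Pre_numofArray (pvDiffWitness_numofArray.1) (pvDiffWitness_numofArray.2) ∧
  D_numofArray (pvDiffWitness_numofArray.1) (pvDiffWitness_numofArray.2) ∧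
  numofArray (pvDiffWitness_numofArray.1) (pvDiffWitness_numofArray.2) = pvDiffWitnessOut_numofArray.1 ∧
  numofArray_alt (pvDiffWitness_numofArray.1) (pvDiffWitness_numofArray.2) = pvDiffWitnessOut_numofArray.2 ∧
  pvDiffWitnessOut_numofArray.1 ≠ pvDiffWitnessOut_numofArray.2
def Claim_exact_numofArray : Prop :=
  ∀ (n : Int) (m : Int), Dom_numofArray n m → Pre_numofArray n m → D_numofArray n m →
    numofArray n m ≠ numofArray_alt n m

-- ===== LEMMAS AND PROOFS =====

-- dp shape invariant: 1000 rows of size 1000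
def Shape (t : Array (Array Int)) : Prop := t.size = 1000 ∧ ∀ r ∈ t, r.size = 1000

-- fold congruence under an invariant
theorem foldl_congr_inv {α β : Type} (P : β → Prop) (l : List α) (f g : β → α → β) (init : β)
    (hP : P init) (hpres : ∀ b a, a ∈ l → P b → P (f b a))
    (heq : ∀ b a, a ∈ l → P b → f b a = g b a) :
    l.foldl f init = l.foldl g init := by
  induction l generalizing init with
  | nil => rfl
  | cons a l ih =>
    simp only [List.foldl_cons]
    rw [← heq init a (by simp) hP]
    exact ih (f init a) (hpres init a (by simp) hP)
      (fun b x hx hb => hpres b x (by simp [hx]) hb)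
      (fun b x hx hb => heq b x (by simp [hx]) hb)

theorem foldl_pres {α β : Type} (P : β → Prop) (l : List α) (f : β → α → β) (init : β)
    (hP : P init) (hpres : ∀ b a, a ∈ l → P b → P (f b a)) : P (l.foldl f init) :=
  List.foldlRecOn l f hP (fun b hb a ha => hpres b a ha hb)

-- Python-index arithmetic on the Array side
theorem pyIdx_nonneg (n : Nat) (i : Int) (h0 : 0 ≤ i) : pyIdx n i = i.toNat := by
  rw [pyIdx, if_neg (by omega)]

theorem size_aset (t : Array (Array Int)) (i : Int) (r : Array Int) :
    (aset t i r).size = t.size := by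
  rw [aset]; split <;> simp

theorem aget_aset_self (t : Array (Array Int)) (i : Int) (r : Array Int)
    (h0 : 0 ≤ i) (hl : i < (t.size : Int)) : aget (aset t i r) i = r := by
  have hk : i.toNat < t.size := by omega
  rw [aset, aget, pyIdx_nonneg _ _ h0, dif_pos hk, pyIdx_nonneg _ _ h0]
  have hk' : i.toNat < (t.set i.toNat r hk).size := by simp [Array.size_set]; omega
  rw [Array.getElem?_eq_getElem hk', Array.getElem_set, if_pos rfl, Option.getD_some]

theorem aget_aset_ne (t : Array (Array Int)) (i k : Int) (r : Array Int)
    (h0 : 0 ≤ i) (hl : i < (t.size : Int)) (hk : 0 ≤ k) (hne : k ≠ i) :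
    aget (aset t i r) k = aget t k := by
  have hik : i.toNat < t.size := by omega
  rw [aset, aget, aget, pyIdx_nonneg _ _ h0, dif_pos hik, pyIdx_nonneg _ _ hk,
    pyIdx_nonneg _ _ hk]
  by_cases h : k.toNat < t.size
  · have h' : k.toNat < (t.set i.toNat r hik).size := by simp [Array.size_set]; omega
    rw [Array.getElem?_eq_getElem h', Array.getElem?_eq_getElem h, Array.getElem_set,
      if_neg (by omega)]
  · rw [Array.getElem?_eq_none (by simp [Array.size_set]; omega),
      Array.getElem?_eq_none (by omega)]

theorem getElem?_aset (t : Array (Array Int)) (i : Int) (r : Array Int) (k : Nat) :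
    (aset t i r)[k]? = if pyIdx t.size i = k ∧ pyIdx t.size i < t.size
      then some r else t[k]? := by
  rw [aset]
  split
  · rename_i h
    rw [Array.getElem?_set]
    by_cases he : pyIdx t.size i = k
    · rw [if_pos he, if_pos ⟨he, h⟩]
    · rw [if_neg he, if_neg (by tauto)]
  · rename_i h
    rw [if_neg (by rintro ⟨he, hlt⟩; exact h hlt)]

theorem aset_aset_self (t : Array (Array Int)) (i : Int) (r r' : Array Int) :
    aset (aset t i r) i r' = aset t i r' := by
  have hs : (aset t i r).size = t.size := size_aset _ _ _
  apply Array.ext_getElem?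
  intro k
  rw [getElem?_aset, getElem?_aset, hs, getElem?_aset]
  by_cases h : pyIdx t.size i = k ∧ pyIdx t.size i < t.size
  · rw [if_pos h, if_pos h]
  · rw [if_neg h, if_neg h, if_neg h]

theorem aset_aget_self (t : Array (Array Int)) (i : Int)
    (h0 : 0 ≤ i) (hl : i < (t.size : Int)) : aset t i (aget t i) = t := by
  have hk : i.toNat < t.size := by omega
  rw [aset, aget, pyIdx_nonneg _ _ h0, dif_pos hk, Array.getElem?_eq_getElem hk,
    Option.getD_some, Array.set_getElem_self]

theorem rget_rset_cases (r : Array Int) (a c : Int) (v : Int)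
    (ha : 0 ≤ a) (hal : a < (r.size : Int)) (hc : 0 ≤ c) :
    rget (rset r a v) c = if a = c then v else rget r c := by
  have hak : a.toNat < r.size := by omega
  rw [rset, rget, rget, pyIdx_nonneg _ _ ha, dif_pos hak, pyIdx_nonneg _ _ hc,
    pyIdx_nonneg _ _ hc]
  by_cases h : c.toNat < r.size
  · have h' : c.toNat < (r.set a.toNat v hak).size := by simp [Array.size_set]; omega
    rw [Array.getElem?_eq_getElem h', Array.getElem?_eq_getElem h, Array.getElem_set]
    by_cases hac : a = c
    · simp [hac]
    · rw [if_neg (by omega), if_neg hac]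
  · have hac : ¬ a = c := by omega
    rw [Array.getElem?_eq_none (by simp [Array.size_set]; omega),
      Array.getElem?_eq_none (by omega), if_neg hac]

theorem size_rset (r : Array Int) (j : Int) (v : Int) : (rset r j v).size = r.size := by
  rw [rset]; split <;> simp

theorem getElem?_rset (r : Array Int) (j : Int) (v : Int) (k : Nat) :
    (rset r j v)[k]? = if pyIdx r.size j = k ∧ pyIdx r.size j < r.size
      then some v else r[k]? := by
  rw [rset]
  split
  · rename_i h
    rw [Array.getElem?_set]
    by_cases he : pyIdx r.size j = k
    · rw [if_pos he, if_pos ⟨he, h⟩]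
    · rw [if_neg he, if_neg (by tauto)]
  · rename_i h
    rw [if_neg (by rintro ⟨he, hlt⟩; exact h hlt)]

theorem rset_rset_self (r : Array Int) (j : Int) (a b : Int) :
    rset (rset r j a) j b = rset r j b := by
  have hs : (rset r j a).size = r.size := size_rset _ _ _
  apply Array.ext_getElem?
  intro k
  rw [getElem?_rset, getElem?_rset, hs, getElem?_rset]
  by_cases h : pyIdx r.size j = k ∧ pyIdx r.size j < r.size
  · rw [if_pos h, if_pos h]
  · rw [if_neg h, if_neg h, if_neg h]

theorem rget_rset_self_of_lt (r : Array Int) (j : Int) (v : Int)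
    (h0 : 0 ≤ j) (hl : j < (r.size : Int)) : rget (rset r j v) j = v := by
  rw [rget_rset_cases r j j v h0 hl h0, if_pos rfl]

theorem rset_rget_self (r : Array Int) (j : Int)
    (h0 : 0 ≤ j) (hl : j < (r.size : Int)) : rset r j (rget r j) = r := by
  have hk : j.toNat < r.size := by omega
  rw [rset, rget, pyIdx_nonneg _ _ h0, dif_pos hk, Array.getElem?_eq_getElem hk,
    Option.getD_some, Array.set_getElem_self]

-- collapse a fold that only rewrites row i (reading rows i and i-1) into a row-level fold
theorem foldl_aset_collapse {α : Type} (l : List α) (t : Array (Array Int)) (i : Int)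
    (h1 : 1 ≤ i) (hl : i < (t.size : Int))
    (G : Array Int → Array Int → α → Array Int) :
    l.foldl (fun t a => aset t i (G (aget t i) (aget t (i-1)) a)) t
      = aset t i (l.foldl (fun r a => G r (aget t (i-1)) a) (aget t i)) := by
  induction l generalizing t with
  | nil => simp [aset_aget_self t i (by omega) hl]
  | cons a l ih =>
    simp only [List.foldl_cons]
    set t' := aset t i (G (aget t i) (aget t (i-1)) a) with ht'
    have hlen : (t'.size : Int) = t.size := by rw [ht', size_aset]
    rw [ih t' (by omega)]
    rw [ht', aget_aset_self _ _ _ (by omega) hl,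
      aget_aset_ne _ _ _ _ (by omega) (by omega) (by omega) (by omega),
      aset_aset_self]

theorem getD_pySetD_cases {β : Type} (d : β) (r : List β) (a c : Int) (v : β)
    (ha : 0 ≤ a) (hal : a < (r.length : Int)) (hc : 0 ≤ c) :
    PySem.List.pyGetD (PySem.List.pySetD r a v) c d
      = if a = c then v else PySem.List.pyGetD r c d := by
  rw [PySem.List.pySetD_of_nonneg _ _ ha, PySem.List.pyGetD_of_nonneg _ _ hc,
    PySem.List.pyGetD_of_nonneg _ _ hc]
  have : a.toNat < r.length := by omega
  by_cases h : a = c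
  · subst h; simp [List.getD, this]
  · have hne : a.toNat ≠ c.toNat := by omega
    simp [List.getD, List.getElem?_set, hne, h]

-- sizes after the two kinds of row point-update folds
theorem foldl_rstore_size (l : List Int) (w : Int → Int) (r : Array Int) :
    (l.foldl (fun r x => rset r x (w x)) r).size = r.size := by
  induction l generalizing r with
  | nil => rfl
  | cons x l ih => simp only [List.foldl_cons]; rw [ih, size_rset]

theorem foldl_rbump_size (E : List (Int × Int)) (r : Array Int) :
    (E.foldl (fun r e => rset r e.1 (rget r e.1 + e.2)) r).size = r.size := by
  induction E generalizing r with
  | nil => rfl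
  | cons e E ih => simp only [List.foldl_cons]; rw [ih, size_rset]

-- read cell c after a fold of stores r[x] = w x over distinct positions
theorem foldl_rstore_read (l : List Int) (w : Int → Int) (r : Array Int)
    (hl : ∀ x ∈ l, 0 ≤ x ∧ x < (r.size : Int)) (hnd : l.Nodup) (c : Int) (hc : 0 ≤ c) :
    rget (l.foldl (fun r x => rset r x (w x)) r) c
      = if c ∈ l then w c else rget r c := by
  induction l generalizing r with
  | nil => simp
  | cons x l ih =>
    have hx := hl x (by simp)
    have hr' : (rset r x (w x)).size = r.size := size_rset _ _ _
    simp only [List.foldl_cons]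
    rw [ih _ (fun y hy => by rw [hr']; exact hl y (by simp [hy])) (by exact hnd.of_cons)]
    by_cases hcl : c ∈ l
    · simp [hcl]
    · rw [rget_rset_cases r x c _ hx.1 hx.2 hc]
      by_cases hxc : x = c
      · simp [hxc, hcl]
      · simp [hxc, hcl, Ne.symm hxc]

-- read cell c after a fold of increments r[e.1] += e.2
theorem foldl_rbump_read (E : List (Int × Int)) (r : Array Int)
    (hE : ∀ e ∈ E, 0 ≤ e.1 ∧ e.1 < (r.size : Int)) (c : Int) (hc : 0 ≤ c) :
    rget (E.foldl (fun r e => rset r e.1 (rget r e.1 + e.2)) r) c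
      = rget r c + ((E.filter (fun e => e.1 == c)).map (·.2)).sum := by
  induction E generalizing r with
  | nil => simp
  | cons e E ih =>
    have he := hE e (by simp)
    have hr' : (rset r e.1 (rget r e.1 + e.2)).size = r.size := size_rset _ _ _
    simp only [List.foldl_cons]
    rw [ih _ (fun x hx => by rw [hr']; exact hE x (by simp [hx]))]
    rw [rget_rset_cases r e.1 c _ he.1 he.2 hc]
    by_cases h : e.1 = c
    · simp [h, add_assoc]
    · have : (e.1 == c) = false := by simp [h]
      simp [this, h]

-- read row c of a table of lists after a fold of appends t[e.1].append(e.2)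
theorem foldl_push_lget_read (E : List (Int × Int)) (t : List (List Int))
    (hE : ∀ e ∈ E, 0 ≤ e.1 ∧ e.1 < (t.length : Int)) (c : Int) (hc : 0 ≤ c) :
    lget (E.foldl (fun t e => lset t e.1 (lget t e.1 ++ [e.2])) t) c
      = lget t c ++ ((E.filter (fun e => e.1 == c)).map (·.2)) := by
  induction E generalizing t with
  | nil => simp
  | cons e E ih =>
    have he := hE e (by simp)
    have hr' : (lset t e.1 (lget t e.1 ++ [e.2])).length = t.length :=
      PySem.List.length_pySetD _ _ _
    simp only [List.foldl_cons]
    rw [ih _ (fun x hx => by rw [hr']; exact hE x (by simp [hx]))]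
    rw [show lget (lset t e.1 (lget t e.1 ++ [e.2])) c
        = if e.1 = c then lget t e.1 ++ [e.2] else lget t c from
      getD_pySetD_cases [] t e.1 c _ he.1 he.2 hc]
    by_cases h : e.1 = c
    · subst h; simp
    · have : (e.1 == c) = false := by simp [h]
      simp [this, h]

-- accumulate into one fixed cell
theorem foldl_rbump_fixed {α : Type} (xs : List α) (r : Array Int) (j : Int)
    (hj : 0 ≤ j) (hjl : j < (r.size : Int)) (g : α → Int) :
    xs.foldl (fun r x => rset r j (rget r j + g x)) r
      = rset r j (rget r j + (xs.map g).sum) := by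
  induction xs generalizing r with
  | nil => simp [rset_rget_self r j hj hjl]
  | cons x xs ih =>
    simp only [List.foldl_cons]
    set r' := rset r j (rget r j + g x) with hr'
    have hlen : (r'.size : Int) = r.size := by rw [hr', size_rset]
    rw [ih r' (by omega)]
    rw [hr', rget_rset_self_of_lt _ _ _ hj hjl, rset_rset_self]
    simp [add_assoc]

-- sum over a list mapped through "if = c"
theorem sum_map_ite_eq_of_nodup (l : List Int) (c : Int) (f : Int → Int)
    (hnd : l.Nodup) (hc : c ∈ l) :
    (l.map (fun v => if v = c then f v else 0)).sum = f c := by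
  induction l with
  | nil => simp at hc
  | cons x l ih =>
    by_cases h : x = c
    · subst h
      have hxl : x ∉ l := (List.nodup_cons.mp hnd).1
      have hz : ∀ v ∈ l, (if v = x then f v else 0) = 0 := by
        intro v hv
        have : v ≠ x := fun h => hxl (h ▸ hv)
        simp [this]
      simp [List.map_congr_left hz]
    · have hcl : c ∈ l := by
        rcases List.mem_cons.mp hc with h' | h'
        · exact absurd h'.symm h
        · exact h'
      simp [h, ih (List.nodup_cons.mp hnd).2 hcl]

theorem sum_map_filter_flatMap {α : Type} (l : List α) (g : α → List (Int × Int))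
    (f : Int × Int → Int) (p : Int × Int → Bool) :
    (((l.flatMap g).filter p).map f).sum
      = (l.map (fun a => (((g a).filter p).map f).sum)).sum := by
  induction l with
  | nil => simp
  | cons a l ih => simp [List.filter_append, ih]

-- shape is preserved by writing a size-1000 row at a valid index
theorem shape_aset (t : Array (Array Int)) (i : Int) (r : Array Int)
    (hS : Shape t) (hr : r.size = 1000) : Shape (aset t i r) := by
  obtain ⟨hlen, hrows⟩ := hS
  refine ⟨by rw [size_aset, hlen], ?_⟩
  intro row hrow
  rw [aset] at hrow
  split at hrow
  · rcases Array.mem_or_eq_of_mem_set hrow with h | h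
    · exact hrows _ h
    · rw [h]; exact hr
  · exact hrows _ hrow

theorem aget_size (t : Array (Array Int)) (i : Int) (hS : Shape t)
    (h0 : 0 ≤ i) (hi : i < 1000) : (aget t i).size = 1000 := by
  obtain ⟨hlen, hrows⟩ := hS
  have hk : i.toNat < t.size := by omega
  rw [aget, pyIdx_nonneg _ _ h0, Array.getElem?_eq_getElem hk, Option.getD_some]
  exact hrows _ (Array.getElem_mem hk)

theorem shape_tset (t : Array (Array Int)) (i j : Int) (v : Int)
    (hS : Shape t) (h0 : 0 ≤ i) (hi : i < 1000) : Shape (tset t i j v) := by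
  refine shape_aset _ _ _ hS ?_
  rw [size_rset]
  exact aget_size t i hS h0 hi

-- the divisor-table / multiple-table event lists of A's precomputation
def eDi (m : Int) : List (Int × Int) :=
  (PySem.List.pyRange 1 (m+1) 1).flatMap
    (fun v => (PySem.List.pyRange (2*v) (m+1) v).map (fun j => (j, v)) ++ [(v, v)])
def eMu (m : Int) : List (Int × Int) :=
  (PySem.List.pyRange 1 (m+1) 1).flatMap
    (fun v => (PySem.List.pyRange (2*v) (m+1) v).map (fun j => (v, j)))

-- the value A's pull DP stores into a cell, as a function of the previous row read through f
def AvalP (m : Int) (f : Int → Int) (j : Int) : Int :=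
  0 + ((((eDi m).filter (fun e => e.1 == j)).map (·.2)).map f).sum
    + ((((eMu m).filter (fun e => e.1 == j)).map (·.2)).map f).sum
def AvalF (m : Int) (p : Array Int) (j : Int) : Int := AvalP m (rget p) j

theorem mem_mul_bounds {m v j : Int} (hv : 1 ≤ v)
    (hj : j ∈ PySem.List.pyRange (2*v) (m+1) v) : 2*v ≤ j ∧ j ≤ m := by
  have := (PySem.List.mem_pyRange_iff_of_pos (by omega) j).mp hj
  omega

theorem eDi_bounds (m : Int) : ∀ e ∈ eDi m, 1 ≤ e.1 ∧ e.1 ≤ m ∧ 1 ≤ e.2 ∧ e.2 ≤ m := by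
  intro e he
  simp only [eDi, List.mem_flatMap, List.mem_append, List.mem_map,
    PySem.List.mem_pyRange_one, List.mem_singleton] at he
  obtain ⟨v, ⟨hv1, hv2⟩, h | h⟩ := he
  · obtain ⟨j, hj, rfl⟩ := h
    have := mem_mul_bounds (by omega) hj
    constructor <;> [omega; constructor <;> [omega; omega]]
  · subst h; omega

theorem eMu_bounds (m : Int) : ∀ e ∈ eMu m, 1 ≤ e.1 ∧ e.1 ≤ m ∧ 1 ≤ e.2 ∧ e.2 ≤ m := by
  intro e he
  simp only [eMu, List.mem_flatMap, List.mem_map, PySem.List.mem_pyRange_one] at he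
  obtain ⟨v, ⟨hv1, hv2⟩, j, hj, rfl⟩ := he
  have := mem_mul_bounds (by omega) hj
  constructor <;> [omega; constructor <;> [omega; omega]]

-- A's precomputation phase, split into its di / mu components as event folds
theorem cons_split (m : Int) :
    (PySem.List.pyRange 1 (m+1) 1).foldl (fun (p : List (List Int) × List (List Int)) i =>
        let p := (PySem.List.pyRange (2*i) (m+1) i).foldl
            (fun (q : List (List Int) × List (List Int)) j =>
              (lset q.1 j (lget q.1 j ++ [i]), lset q.2 i (lget q.2 i ++ [j]))) p
        (lset p.1 i (lget p.1 i ++ [i]), p.2))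
      (List.replicate 1000 [], List.replicate 1000 [])
    = ((eDi m).foldl (fun t e => lset t e.1 (lget t e.1 ++ [e.2])) (List.replicate 1000 []),
       (eMu m).foldl (fun t e => lset t e.1 (lget t e.1 ++ [e.2])) (List.replicate 1000 [])) := by
  rw [PySem.List.foldl_congr_mem _ _
      (fun (p : List (List Int) × List (List Int)) i =>
        (lset ((PySem.List.pyRange (2*i) (m+1) i).foldl
            (fun a j => lset a j (lget a j ++ [i])) p.1) i
          (lget ((PySem.List.pyRange (2*i) (m+1) i).foldl
            (fun a j => lset a j (lget a j ++ [i])) p.1) i ++ [i]),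
         (PySem.List.pyRange (2*i) (m+1) i).foldl
            (fun b j => lset b i (lget b i ++ [j])) p.2)) _
      (fun acc i _ => by
        obtain ⟨a, b⟩ := acc
        simp only []
        rw [PySem.List.foldl_prod_mk (fun a j => lset a j (lget a j ++ [i]))
          (fun b j => lset b i (lget b i ++ [j]))])]
  rw [show (fun (p : List (List Int) × List (List Int)) i =>
        (lset ((PySem.List.pyRange (2*i) (m+1) i).foldl
            (fun a j => lset a j (lget a j ++ [i])) p.1) i
          (lget ((PySem.List.pyRange (2*i) (m+1) i).foldl
            (fun a j => lset a j (lget a j ++ [i])) p.1) i ++ [i]),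
         (PySem.List.pyRange (2*i) (m+1) i).foldl
            (fun b j => lset b i (lget b i ++ [j])) p.2))
      = (fun (p : List (List Int) × List (List Int)) i =>
        ((fun a i => lset ((PySem.List.pyRange (2*i) (m+1) i).foldl
            (fun a j => lset a j (lget a j ++ [i])) a) i
          (lget ((PySem.List.pyRange (2*i) (m+1) i).foldl
            (fun a j => lset a j (lget a j ++ [i])) a) i ++ [i])) p.1 i,
         (fun b i => (PySem.List.pyRange (2*i) (m+1) i).foldl
            (fun b j => lset b i (lget b i ++ [j])) b) p.2 i)) from rfl,
    PySem.List.foldl_prod_mk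
      (fun a i => lset ((PySem.List.pyRange (2*i) (m+1) i).foldl
            (fun a j => lset a j (lget a j ++ [i])) a) i
          (lget ((PySem.List.pyRange (2*i) (m+1) i).foldl
            (fun a j => lset a j (lget a j ++ [i])) a) i ++ [i]))
      (fun b i => (PySem.List.pyRange (2*i) (m+1) i).foldl
            (fun b j => lset b i (lget b i ++ [j])) b)]
  refine Prod.ext ?_ ?_ <;> simp only []
  · rw [eDi, List.foldl_flatMap]
    exact PySem.List.foldl_congr_mem _ _ _ _ (fun a i _ => by
      rw [List.foldl_append, List.foldl_map]
      rfl)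
  · rw [eMu, List.foldl_flatMap]
    exact PySem.List.foldl_congr_mem _ _ _ _ (fun b i _ => by
      rw [List.foldl_map])

-- row contents of the di / mu tables
theorem lget_cons (m : Int) (hm : m ≤ 999) (c : Int) (hc : 0 ≤ c) :
    lget ((eDi m).foldl (fun t e => lset t e.1 (lget t e.1 ++ [e.2])) (List.replicate 1000 [])) c
      = ((eDi m).filter (fun e => e.1 == c)).map (·.2)
    ∧ lget ((eMu m).foldl (fun t e => lset t e.1 (lget t e.1 ++ [e.2])) (List.replicate 1000 [])) c
      = ((eMu m).filter (fun e => e.1 == c)).map (·.2) := by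
  have hlen : ((List.replicate 1000 ([] : List Int)).length : Int) = 1000 := by
    rw [List.length_replicate]; rfl
  have hinit : lget (List.replicate 1000 ([] : List Int)) c = [] := by
    rw [lget, PySem.List.pyGetD_of_nonneg _ _ hc, List.getD,
      List.getElem?_replicate]
    by_cases h : c.toNat < 1000 <;> simp [h]
  constructor
  · rw [foldl_push_lget_read _ _ (fun e he => by
      have := eDi_bounds m e he
      constructor <;> omega) c hc, hinit, List.nil_append]
  · rw [foldl_push_lget_read _ _ (fun e he => by
      have := eMu_bounds m e he
      constructor <;> omega) c hc, hinit, List.nil_append]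

-- A's DP body rewrites row i to the pull values
theorem bodyA_eq (m : Int) (dp : Array (Array Int)) (i : Int)
    (hS : Shape dp) (hi2 : 2 ≤ i) (hi : i ≤ 999) (hm : m ≤ 999)
    (di mu : List (List Int))
    (hdi : ∀ c, 0 ≤ c → lget di c = ((eDi m).filter (fun e => e.1 == c)).map (·.2))
    (hmu : ∀ c, 0 ≤ c → lget mu c = ((eMu m).filter (fun e => e.1 == c)).map (·.2)) :
    (PySem.List.pyRange 1 (m+1) 1).foldl (fun dp j =>
        let dp := tset dp i j 0
        let dp := (lget di j).foldl (fun dp x => tset dp i j (tget dp i j + tget dp (i-1) x)) dp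
        (lget mu j).foldl (fun dp x => tset dp i j (tget dp i j + tget dp (i-1) x)) dp) dp
    = aset dp i ((PySem.List.pyRange 1 (m+1) 1).foldl
        (fun r j => rset r j (AvalF m (aget dp (i-1)) j)) (aget dp i)) := by
  have hjbound : ∀ j ∈ PySem.List.pyRange 1 (m+1) 1, 1 ≤ j ∧ j ≤ 999 := by
    intro j hj
    have := PySem.List.mem_pyRange_one.mp hj
    omega
  rw [foldl_congr_inv Shape _ _
      (fun dp j => aset dp i
        ((lget mu j).foldl (fun r x => rset r j (rget r j + rget (aget dp (i-1)) x))
          ((lget di j).foldl (fun r x => rset r j (rget r j + rget (aget dp (i-1)) x))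
            (rset (aget dp i) j 0)))) _ hS
      (fun b j hj hSb => by
        simp only [tset, tget]
        have hbl : (b.size : Int) = 1000 := by rw [hSb.1]; rfl
        rw [foldl_aset_collapse (lget di j) _ i (by omega) (by rw [size_aset]; omega)
          (fun r q x => rset r j (rget r j + rget q x))]
        rw [aget_aset_self _ _ _ (by omega) (by omega),
          aget_aset_ne _ _ _ _ (by omega) (by omega) (by omega) (by omega),
          aset_aset_self]
        rw [foldl_aset_collapse (lget mu j) _ i (by omega) (by rw [size_aset]; omega)
          (fun r q x => rset r j (rget r j + rget q x))]
        rw [aget_aset_self _ _ _ (by omega) (by omega),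
          aget_aset_ne _ _ _ _ (by omega) (by omega) (by omega) (by omega),
          aset_aset_self]
        exact shape_aset _ _ _ hSb
          (foldl_pres (fun (r : Array Int) => r.size = 1000) _ _ _
            (foldl_pres (fun (r : Array Int) => r.size = 1000) _ _ _
              (show (rset _ _ _).size = 1000 by
                rw [size_rset]; exact aget_size _ _ hSb (by omega) (by omega))
              (fun b a _ hb => show (rset _ _ _).size = 1000 by rw [size_rset]; exact hb))
            (fun b a _ hb => show (rset _ _ _).size = 1000 by rw [size_rset]; exact hb)))
      (fun b j hj hSb => by
        simp only [tset, tget]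
        have hbl : (b.size : Int) = 1000 := by rw [hSb.1]; rfl
        rw [foldl_aset_collapse (lget di j) _ i (by omega) (by rw [size_aset]; omega)
          (fun r q x => rset r j (rget r j + rget q x))]
        rw [aget_aset_self _ _ _ (by omega) (by omega),
          aget_aset_ne _ _ _ _ (by omega) (by omega) (by omega) (by omega),
          aset_aset_self]
        rw [foldl_aset_collapse (lget mu j) _ i (by omega) (by rw [size_aset]; omega)
          (fun r q x => rset r j (rget r j + rget q x))]
        rw [aget_aset_self _ _ _ (by omega) (by omega),
          aget_aset_ne _ _ _ _ (by omega) (by omega) (by omega) (by omega),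
          aset_aset_self])]
  have hdl : (dp.size : Int) = 1000 := by rw [hS.1]; rfl
  rw [foldl_aset_collapse (PySem.List.pyRange 1 (m+1) 1) dp i (by omega) (by omega)
    (fun r q j => (lget mu j).foldl (fun r x => rset r j (rget r j + rget q x))
      ((lget di j).foldl (fun r x => rset r j (rget r j + rget q x))
        (rset r j 0)))]
  congr 1
  refine foldl_congr_inv (fun (r : Array Int) => r.size = 1000) _ _ _ _
    (aget_size _ _ hS (by omega) (by omega))
    (fun r j hj hr =>
      foldl_pres (fun (r : Array Int) => r.size = 1000) _ _ _
        (foldl_pres (fun (r : Array Int) => r.size = 1000) _ _ _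
          (show (rset _ _ _).size = 1000 by rw [size_rset]; exact hr)
          (fun b a _ hb => show (rset _ _ _).size = 1000 by rw [size_rset]; exact hb))
        (fun b a _ hb => show (rset _ _ _).size = 1000 by rw [size_rset]; exact hb))
    (fun r j hj hr => by
      have hjb := hjbound j hj
      have hr0 : ((rset r j 0).size : Int) = 1000 := by
        rw [size_rset, hr]; rfl
      rw [foldl_rbump_fixed (lget di j) _ j (by omega) (by omega)
        (fun x => rget (aget dp (i-1)) x)]
      rw [foldl_rbump_fixed (lget mu j) _ j (by omega)
        (by rw [size_rset]; omega)
        (fun x => rget (aget dp (i-1)) x)]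
      rw [rget_rset_self_of_lt _ _ _ (by omega) (by omega)]
      rw [rget_rset_self_of_lt _ _ _ (by omega) (by omega)]
      rw [rset_rset_self, rset_rset_self]
      rw [hdi j (by omega), hmu j (by omega)]
      rfl)

-- projection of A's final loop (which also clears di / mu) onto the running sum
theorem foldl_proj1 (l : List Int) (g : Int → Int) (a : Int)
    (x y : List (List Int)) :
    (l.foldl (fun (s : Int × List (List Int) × List (List Int)) i =>
        (s.1 + g i, lset s.2.1 i [], lset s.2.2 i [])) (a, x, y)).1
      = l.foldl (fun a i => a + g i) a := by
  induction l generalizing a x y with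
  | nil => rfl
  | cons i l ih => simp only [List.foldl_cons]; exact ih _ _ _

theorem shape_init (m : Int) (hm : m ≤ 999) :
    Shape ((PySem.List.pyRange 1 (m+1) 1).foldl (fun dp i => tset dp 1 i 1)
      (Array.replicate 1000 (Array.replicate 1000 0))) := by
  refine foldl_pres Shape _ _ _ ⟨Array.size_replicate, ?_⟩ ?_
  · intro r hr
    rw [Array.eq_of_mem_replicate hr, Array.size_replicate]
  · intro b a _ hb
    exact shape_tset _ _ _ _ hb (by omega) (by omega)

-- ===== the common pure value layer: both DPs compute valM =====

-- proper-divisor / proper-multiple sums over [1..m], and one DP step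
def dSum (m : Int) (f : Int → Int) (c : Int) : Int :=
  ((PySem.List.pyRange 1 (m+1) 1).map (fun a => if a ∣ c ∧ a ≠ c then f a else 0)).sum
def uSum (m : Int) (f : Int → Int) (c : Int) : Int :=
  ((PySem.List.pyRange 1 (m+1) 1).map (fun a => if c ∣ a ∧ a ≠ c then f a else 0)).sum
def nstep (m : Int) (f : Int → Int) (c : Int) : Int := f c + dSum m f c + uSum m f c
def valM (m : Int) : Nat → Int → Int
  | 0, _ => 1
  | k+1, c => nstep m (valM m k) c

theorem dSum_congr (m : Int) (f g : Int → Int) (c : Int)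
    (h : ∀ a, 1 ≤ a → a ≤ m → f a = g a) : dSum m f c = dSum m g c := by
  rw [dSum, dSum]
  congr 1
  refine List.map_congr_left (fun a ha => ?_)
  have hb := PySem.List.mem_pyRange_one.mp ha
  by_cases hP : a ∣ c ∧ a ≠ c
  · rw [if_pos hP, if_pos hP, h a hb.1 (by omega)]
  · rw [if_neg hP, if_neg hP]

theorem uSum_congr (m : Int) (f g : Int → Int) (c : Int)
    (h : ∀ a, 1 ≤ a → a ≤ m → f a = g a) : uSum m f c = uSum m g c := by
  rw [uSum, uSum]
  congr 1
  refine List.map_congr_left (fun a ha => ?_)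
  have hb := PySem.List.mem_pyRange_one.mp ha
  by_cases hP : c ∣ a ∧ a ≠ c
  · rw [if_pos hP, if_pos hP, h a hb.1 (by omega)]
  · rw [if_neg hP, if_neg hP]

theorem nstep_congr (m : Int) (f g : Int → Int) (c : Int) (hc1 : 1 ≤ c) (hcm : c ≤ m)
    (h : ∀ a, 1 ≤ a → a ≤ m → f a = g a) : nstep m f c = nstep m g c := by
  rw [nstep, nstep, dSum_congr m f g c h, uSum_congr m f g c h, h c hc1 hcm]

-- generic list/Finset sum plumbing
theorem sum_ite_eq_mem (l : List Int) (hnd : l.Nodup) (c : Int) (Q : Prop) [Decidable Q]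
    (y : Int) :
    (l.map (fun x => if x = c ∧ Q then y else 0)).sum = if c ∈ l ∧ Q then y else 0 := by
  induction l with
  | nil => simp
  | cons x l ih =>
    have hnd' := List.nodup_cons.mp hnd
    rw [List.map_cons, List.sum_cons, ih hnd'.2]
    by_cases hx : x = c
    · subst hx
      by_cases hQ : Q
      · rw [if_pos ⟨rfl, hQ⟩, if_neg (fun h => hnd'.1 h.1),
          if_pos ⟨List.mem_cons_self, hQ⟩]
        ring
      · rw [if_neg (by tauto), if_neg (by tauto), if_neg (by tauto)]
        ring
    · by_cases hcl : c ∈ l ∧ Q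
      · rw [if_neg (by tauto), if_pos hcl, if_pos ⟨List.mem_cons_of_mem _ hcl.1, hcl.2⟩]
        ring
      · rw [if_neg (by tauto), if_neg hcl, if_neg (by
          rintro ⟨hm, hq⟩
          rcases List.mem_cons.mp hm with h | h
          · exact hx h.symm
          · exact hcl ⟨h, hq⟩)]
        ring

theorem ite_sum_list (l : List Int) (hnd : l.Nodup) (P : Int → Prop) [DecidablePred P]
    (f : Int → Int) :
    (l.map (fun x => if P x then f x else 0)).sum
      = ∑ a ∈ l.toFinset.filter (fun a => P a), f a := by
  rw [Finset.sum_filter, List.sum_toFinset _ hnd]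

theorem toFinset_pyRange_one (a b : Int) :
    (PySem.List.pyRange a b 1).toFinset = Finset.Icc a (b-1) := by
  ext x
  simp [PySem.List.mem_pyRange_one, Finset.mem_Icc]

theorem nodup_pyRange_pos (a b s : Int) (hs : 0 < s) : (PySem.List.pyRange a b s).Nodup := by
  rw [PySem.List.pyRange_of_pos a b hs]
  refine List.Nodup.map ?_ (List.nodup_range)
  intro k1 k2 h
  simp only [] at h
  have : s * (k1 : Int) = s * k2 := by omega
  have := mul_left_cancel₀ (by omega : s ≠ 0) this
  omega

theorem filter_beq_of_nodup (l : List Int) (hnd : l.Nodup) (c : Int) :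
    l.filter (fun x => x == c) = if c ∈ l then [c] else [] := by
  induction l with
  | nil => simp
  | cons x l ih =>
    have hnd' := List.nodup_cons.mp hnd
    rw [List.filter_cons]
    by_cases hx : x = c
    · subst hx
      have hfl : l.filter (fun y => y == x) = [] := by
        rw [List.filter_eq_nil_iff]
        intro y hy
        have : y ≠ x := fun h => hnd'.1 (h ▸ hy)
        simp [this]
      simp [hfl]
    · have hbx : ((x == c) = true) = False := by simp [hx]
      rw [if_neg (by simp [hx]), ih hnd'.2]
      by_cases hc : c ∈ l
      · rw [if_pos hc, if_pos (List.mem_cons_of_mem _ hc)]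
      · rw [if_neg hc, if_neg (by simp [hc, Ne.symm hx])]

-- a divisor strictly below c is at most c/2
theorem proper_div_twice {a c : Int} (ha : 1 ≤ a) (hc : 1 ≤ c) (hd : a ∣ c) (hne : a ≠ c) :
    2*a ≤ c := by
  obtain ⟨t, rfl⟩ := hd
  have ht1 : 1 ≤ t := by nlinarith
  have ht2 : t ≠ 1 := by rintro rfl; simp at hne
  have ht3 : 2 ≤ t := by omega
  nlinarith

-- membership of c in the stride list of multiples of v
theorem mem_stride_iff (v c m : Int) (hv : 1 ≤ v) (hc : 1 ≤ c) (hcm : c ≤ m) :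
    c ∈ PySem.List.pyRange (2*v) (m+1) v ↔ v ∣ c ∧ v ≠ c := by
  rw [PySem.List.mem_pyRange_iff_of_pos (by omega)]
  constructor
  · rintro ⟨h1, h2, h3⟩
    have hdvd : v ∣ c := by
      have : c = (c - 2*v) + 2*v := by ring
      rw [this]
      exact dvd_add h3 ⟨2, by ring⟩
    exact ⟨hdvd, by omega⟩
  · rintro ⟨hdvd, hne⟩
    have h2 := proper_div_twice hv hc hdvd hne
    refine ⟨by omega, by omega, ?_⟩
    exact dvd_sub hdvd ⟨2, by ring⟩

theorem stride_toFinset (c m : Int) (hc : 1 ≤ c) (hcm : c ≤ m) :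
    (PySem.List.pyRange (2*c) (m+1) c).toFinset
      = (Finset.Icc 1 m).filter (fun a => c ∣ a ∧ a ≠ c) := by
  ext x
  simp only [List.mem_toFinset, Finset.mem_filter, Finset.mem_Icc]
  constructor
  · intro hx
    have hb := (PySem.List.mem_pyRange_iff_of_pos (by omega : (0:Int) < c) x).mp hx
    have := (mem_stride_iff c x m hc (by omega) (by omega)).mp hx
    exact ⟨⟨by omega, by omega⟩, this.1, fun h => this.2 h.symm⟩
  · rintro ⟨⟨h1, h2⟩, hdvd, hne⟩
    exact (mem_stride_iff c x m hc h1 h2).mpr ⟨hdvd, fun h => hne h.symm⟩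

theorem dSum_finset (m : Int) (f : Int → Int) (c : Int) :
    dSum m f c = ∑ a ∈ (Finset.Icc 1 m).filter (fun a => a ∣ c ∧ a ≠ c), f a := by
  rw [dSum, ite_sum_list _ (PySem.List.nodup_pyRange_one _ _), toFinset_pyRange_one]
  norm_num

theorem uSum_finset (m : Int) (f : Int → Int) (c : Int) :
    uSum m f c = ∑ a ∈ (Finset.Icc 1 m).filter (fun a => c ∣ a ∧ a ≠ c), f a := by
  rw [uSum, ite_sum_list _ (PySem.List.nodup_pyRange_one _ _), toFinset_pyRange_one]
  norm_num

-- A's pull value, in pure form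
theorem AvalP_eq (m : Int) (f : Int → Int) (c : Int) (hc1 : 1 ≤ c) (hcm : c ≤ m) :
    AvalP m f c = nstep m f c := by
  have hcmem : c ∈ PySem.List.pyRange 1 (m+1) 1 :=
    PySem.List.mem_pyRange_one.mpr ⟨hc1, by omega⟩
  have hK : ∀ (l : List (Int × Int)),
      (((l.filter (fun e => e.1 == c)).map (·.2)).map f).sum
        = ((l.filter (fun e => e.1 == c)).map (fun e => f e.2)).sum := by
    intro l; rw [List.map_map]; rfl
  rw [AvalP, hK, hK, eDi, eMu, sum_map_filter_flatMap, sum_map_filter_flatMap]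
  have hDi : ((PySem.List.pyRange 1 (m+1) 1).map (fun v =>
        (((((PySem.List.pyRange (2*v) (m+1) v).map (fun j => (j, v)) ++ [(v, v)]).filter
          (fun e => e.1 == c)).map (fun e => f e.2))).sum)).sum
      = dSum m f c + f c := by
    have perv : ∀ v ∈ PySem.List.pyRange 1 (m+1) 1,
        ((((PySem.List.pyRange (2*v) (m+1) v).map (fun j => (j, v)) ++ [(v, v)]).filter
          (fun e => e.1 == c)).map (fun e => f e.2)).sum
        = (if v ∣ c ∧ v ≠ c then f v else 0) + (if v = c then f v else 0) := by
      intro v hv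
      have hv1 : 1 ≤ v := (PySem.List.mem_pyRange_one.mp hv).1
      rw [List.filter_append, List.map_append, List.sum_append, List.filter_map]
      have hcomp : ((fun (e : Int × Int) => e.1 == c) ∘ (fun j => (j, v)))
          = (fun j => j == c) := rfl
      rw [hcomp, filter_beq_of_nodup _ (nodup_pyRange_pos _ _ _ (by omega)) c]
      congr 1
      · by_cases hmem : c ∈ PySem.List.pyRange (2*v) (m+1) v
        · rw [if_pos hmem, if_pos ((mem_stride_iff v c m hv1 hc1 hcm).mp hmem)]
          simp
        · rw [if_neg hmem,
            if_neg (fun h => hmem ((mem_stride_iff v c m hv1 hc1 hcm).mpr h))]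
          simp
      · by_cases hvc : v = c <;> simp [hvc]
    rw [List.map_congr_left perv, PySem.List.sum_map_add_int]
    congr 1
    exact sum_map_ite_eq_of_nodup _ c f (PySem.List.nodup_pyRange_one _ _) hcmem
  have hMu : ((PySem.List.pyRange 1 (m+1) 1).map (fun v =>
        ((((PySem.List.pyRange (2*v) (m+1) v).map (fun j => (v, j))).filter
          (fun e => e.1 == c)).map (fun e => f e.2)).sum)).sum
      = uSum m f c := by
    have perv : ∀ v ∈ PySem.List.pyRange 1 (m+1) 1,
        ((((PySem.List.pyRange (2*v) (m+1) v).map (fun j => (v, j))).filter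
          (fun e => e.1 == c)).map (fun e => f e.2)).sum
        = (if v = c then ((PySem.List.pyRange (2*v) (m+1) v).map f).sum else 0) := by
      intro v _
      rw [List.filter_map]
      have hcomp : ((fun (e : Int × Int) => e.1 == c) ∘ (fun j => (v, j)))
          = (fun _ => v == c) := rfl
      rw [hcomp]
      by_cases h : v = c
      · subst h; simp [List.map_map]; rfl
      · have : (v == c) = false := by simp [h]
        simp [this, List.filter_congr, h]
    rw [List.map_congr_left perv,
      sum_map_ite_eq_of_nodup _ c _ (PySem.List.nodup_pyRange_one _ _) hcmem]
    rw [← List.sum_toFinset f (nodup_pyRange_pos _ _ _ (by omega)),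
      stride_toFinset c m hc1 hcm, uSum_finset]
  rw [hDi, hMu, nstep]
  ring

-- ===== B-side: the while-loop as an event fold =====

def bump (w : Array Int) (e : Int × Int) : Array Int := rset w e.1 (rget w e.1 + e.2)

-- the increments one trial divisor d emits for value j (reading the old vector through f)
def evD (f : Int → Int) (j d : Int) : List (Int × Int) :=
  if PySem.Int.mod j d = 0 then
    (if d ≠ j then [(j, f d), (d, f j)] else []) ++
    (if PySem.Int.floordiv j d ≠ d ∧ PySem.Int.floordiv j d ≠ j then
      [(j, f (PySem.Int.floordiv j d)), (PySem.Int.floordiv j d, f j)] else [])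
  else []

-- trial divisors of j: 1 ≤ d with d*d ≤ j, in order
def sqL (j : Int) : List Int :=
  (PySem.List.pyRange 1 (j+1) 1).filter (fun x => decide (x*x ≤ j))

theorem mem_sqL (j x : Int) : x ∈ sqL j ↔ 1 ≤ x ∧ x*x ≤ j := by
  rw [sqL, List.mem_filter]
  simp only [PySem.List.mem_pyRange_one, decide_eq_true_eq]
  constructor
  · rintro ⟨⟨h1, _⟩, h2⟩
    exact ⟨h1, h2⟩
  · rintro ⟨h1, h2⟩
    have := le_mul_self_int x
    exact ⟨⟨h1, by omega⟩, h2⟩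

def stepW2 (v w : Array Int) (j d : Int) : Array Int :=
  if d ≠ j then
    rset (rset w j (rget w j + rget v d)) d
      (rget (rset w j (rget w j + rget v d)) d + rget v j)
  else w

def stepFull (v w : Array Int) (j d : Int) : Array Int :=
  if PySem.Int.mod j d = 0 then
    (if PySem.Int.floordiv j d ≠ d ∧ PySem.Int.floordiv j d ≠ j then
      rset
        (rset (stepW2 v w j d) j
          (rget (stepW2 v w j d) j + rget v (PySem.Int.floordiv j d)))
        (PySem.Int.floordiv j d)
        (rget
          (rset (stepW2 v w j d) j
            (rget (stepW2 v w j d) j + rget v (PySem.Int.floordiv j d)))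
          (PySem.Int.floordiv j d) + rget v j)
    else stepW2 v w j d)
  else w

theorem step_eq (v w : Array Int) (j d : Int) :
    (evD (rget v) j d).foldl bump w = stepFull v w j d := by
  simp only [evD, stepFull, stepW2]
  by_cases h1 : PySem.Int.mod j d = 0
  · rw [if_pos h1, if_pos h1]
    by_cases h2 : d ≠ j <;>
      by_cases h3 : PySem.Int.floordiv j d ≠ d ∧ PySem.Int.floordiv j d ≠ j
    · simp only [if_pos h2, if_pos h3]; rfl
    · simp only [if_pos h2, if_neg h3]; rfl
    · simp only [if_neg h2, if_pos h3]; rfl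
    · simp only [if_neg h2, if_neg h3]; rfl
  · rw [if_neg h1, if_neg h1]
    rfl

theorem bInner_eq (v : Array Int) (j : Int) :
    ∀ (k : Nat) (w : Array Int) (d : Int), 1 ≤ d → (j + 1 - d).toNat = k →
      bInner v j w d
        = (((PySem.List.pyRange d (j+1) 1).filter (fun x => decide (x*x ≤ j))).flatMap
            (evD (rget v) j)).foldl bump w := by
  intro k
  induction k with
  | zero =>
    intro w d hd hk
    have hjd : j < d := by omega
    have hno : ¬ d * d ≤ j := by nlinarith [le_mul_self_int d]
    rw [bInner, dif_neg hno, PySem.List.pyRange_one_eq_nil (by omega)]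
    rfl
  | succ k ih =>
    intro w d hd hk
    by_cases hdd : d * d ≤ j
    · have hdj : d ≤ j := le_trans (le_mul_self_int d) hdd
      have hflt : (PySem.List.pyRange d (j+1) 1).filter (fun x => decide (x*x ≤ j))
          = d :: (PySem.List.pyRange (d+1) (j+1) 1).filter (fun x => decide (x*x ≤ j)) := by
        rw [PySem.List.pyRange_one_cons (by omega : d < j + 1), List.filter_cons,
          if_pos (by simpa using hdd)]
      rw [bInner, dif_pos hdd, hflt, List.flatMap_cons, List.foldl_append,
        step_eq v w j d]
      exact ih _ (d+1) (by omega) (by omega)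
    · rw [bInner, dif_neg hdd]
      have hfl : (PySem.List.pyRange d (j+1) 1).filter (fun x => decide (x*x ≤ j)) = [] := by
        rw [List.filter_eq_nil_iff]
        intro x hx
        have hxb := PySem.List.mem_pyRange_one.mp hx
        have : ¬ x * x ≤ j := by nlinarith
        simpa using this
      rw [hfl]
      rfl

-- all events one layer emits
def eB (m : Int) (f : Int → Int) : List (Int × Int) :=
  (PySem.List.pyRange 1 (m+1) 1).flatMap (fun j => (sqL j).flatMap (evD f j))

theorem bLayer_eq (m : Int) (v : Array Int) :
    bLayer m v = (eB m (rget v)).foldl bump v := by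
  rw [bLayer, eB, List.foldl_flatMap]
  refine PySem.List.foldl_congr_mem _ _ _ _ (fun w j _ => ?_)
  rw [bInner_eq v j (j + 1 - 1).toNat w 1 (by omega) rfl, sqL, List.foldl_flatMap]

-- every event cell lies in [1..m], every cofactor too
theorem evD_mem_bounds (f : Int → Int) (j d : Int) (hj1 : 1 ≤ j) (hd : 1 ≤ d) :
    ∀ e ∈ evD f j d, 1 ≤ e.1 ∧ e.1 ≤ j := by
  intro e he
  rw [evD] at he
  by_cases h1 : PySem.Int.mod j d = 0
  · rw [if_pos h1] at he
    have hdvd : d ∣ j := (PySem.Int.mod_eq_zero_iff_dvd j d).mp h1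
    have hdj : d ≤ j := Int.le_of_dvd (by omega) hdvd
    have hfd : PySem.Int.floordiv j d = j / d := PySem.Int.floordiv_eq_ediv_of_pos (by omega)
    have he1 : 1 ≤ j / d := by
      have := Int.ediv_mul_cancel hdvd
      nlinarith [Int.le_of_dvd (by omega : (0:Int) < j) hdvd,
        Int.ediv_nonneg (by omega : (0:Int) ≤ j) (by omega : (0:Int) ≤ d),
        Int.lt_ediv_add_one_mul_self j (by omega : (0:Int) < d)]
    have he2 : j / d ≤ j := by
      have hq := Int.ediv_mul_cancel hdvd
      nlinarith
    rcases List.mem_append.mp he with h | h <;> revert h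
    · by_cases h2 : d ≠ j <;> simp_all <;> rintro (⟨rfl, _⟩ | ⟨rfl, _⟩) <;> omega
    · by_cases h3 : PySem.Int.floordiv j d ≠ d ∧ PySem.Int.floordiv j d ≠ j <;>
        simp_all <;> rintro (⟨rfl, _⟩ | ⟨rfl, _⟩) <;> omega
  · rw [if_neg h1] at he
    simp at he

theorem eB_bounds (m : Int) (f : Int → Int) :
    ∀ e ∈ eB m f, 1 ≤ e.1 ∧ e.1 ≤ m := by
  intro e he
  rw [eB, List.mem_flatMap] at he
  obtain ⟨j, hj, he⟩ := he
  obtain ⟨hj1, hjm⟩ := PySem.List.mem_pyRange_one.mp hj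
  rw [List.mem_flatMap] at he
  obtain ⟨d, hd, he⟩ := he
  have hd1 := ((mem_sqL j d).mp hd).1
  have := evD_mem_bounds f j d hj1 hd1 e he
  omega

theorem nodup_sqL (j : Int) : (sqL j).Nodup :=
  (PySem.List.nodup_pyRange_one _ _).filter _

theorem toFinset_sqL (j : Int) :
    (sqL j).toFinset = (Finset.Icc 1 j).filter (fun d => d*d ≤ j) := by
  ext x
  simp only [List.mem_toFinset, mem_sqL, Finset.mem_filter, Finset.mem_Icc]
  constructor
  · rintro ⟨h1, h2⟩
    exact ⟨⟨h1, le_trans (le_mul_self_int x) h2⟩, h2⟩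
  · rintro ⟨⟨h1, _⟩, h2⟩
    exact ⟨h1, h2⟩

-- exact division bookkeeping for a positive divisor
theorem div_pair {a c : Int} (hc : 1 ≤ c) (ha1 : 1 ≤ a) (hdvd : a ∣ c) :
    1 ≤ c/a ∧ c/a ≤ c ∧ (c/a) ∣ c ∧ a * (c/a) = c ∧ c/(c/a) = a := by
  obtain ⟨t, ht⟩ := hdvd
  have hta : c / a = t := by rw [ht]; exact Int.mul_ediv_cancel_left t (by omega)
  have ht1 : 1 ≤ t := by nlinarith
  have htc : t ≤ c := by nlinarith
  have hct : c / t = a := by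
    rw [ht, mul_comm]; exact Int.mul_ediv_cancel_left a (by omega)
  rw [hta]
  exact ⟨ht1, htc, ⟨a, by rw [ht]; ring⟩, ht.symm, hct⟩

-- what one trial divisor contributes to cell c
theorem evD_cell (f : Int → Int) (j d c : Int) (hd : 1 ≤ d) :
    (((evD f j d).filter (fun e => e.1 == c)).map (·.2)).sum
    = (if d ∣ j ∧ d ≠ j ∧ j = c then f d else 0)
    + (if d ∣ j ∧ d ≠ j ∧ d = c then f j else 0)
    + (if d ∣ j ∧ j/d ≠ d ∧ j/d ≠ j ∧ j = c then f (j/d) else 0)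
    + (if d ∣ j ∧ j/d ≠ d ∧ j/d ≠ j ∧ j/d = c then f j else 0) := by
  have hfd : PySem.Int.floordiv j d = j / d := PySem.Int.floordiv_eq_ediv_of_pos (by omega)
  rw [evD, hfd]
  clear hfd
  by_cases h1 : PySem.Int.mod j d = 0
  · have hdvd : d ∣ j := (PySem.Int.mod_eq_zero_iff_dvd j d).mp h1
    rw [if_pos h1]
    by_cases h2 : d ≠ j <;> by_cases h3 : j/d ≠ d ∧ j/d ≠ j
    · rw [if_pos h2, if_pos h3]
      rw [if_congr (show (d ∣ j ∧ d ≠ j ∧ j = c) ↔ (j = c) by tauto) rfl rfl,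
        if_congr (show (d ∣ j ∧ d ≠ j ∧ d = c) ↔ (d = c) by tauto) rfl rfl,
        if_congr (show (d ∣ j ∧ j/d ≠ d ∧ j/d ≠ j ∧ j = c) ↔ (j = c) by tauto) rfl rfl,
        if_congr (show (d ∣ j ∧ j/d ≠ d ∧ j/d ≠ j ∧ j/d = c) ↔ (j/d = c) by tauto) rfl rfl]
      by_cases hjc : j = c <;> by_cases hdc : d = c <;> by_cases hec : j/d = c <;>
        simp [List.filter_cons, hjc, hdc, hec] <;> first | ring1 | (split_ifs <;> simp <;> ring1) | simp
    · rw [if_pos h2, if_neg h3]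
      rw [if_congr (show (d ∣ j ∧ d ≠ j ∧ j = c) ↔ (j = c) by tauto) rfl rfl,
        if_congr (show (d ∣ j ∧ d ≠ j ∧ d = c) ↔ (d = c) by tauto) rfl rfl,
        if_neg (show ¬(d ∣ j ∧ j/d ≠ d ∧ j/d ≠ j ∧ j = c) by tauto),
        if_neg (show ¬(d ∣ j ∧ j/d ≠ d ∧ j/d ≠ j ∧ j/d = c) by tauto)]
      by_cases hjc : j = c <;> by_cases hdc : d = c <;>
        simp [List.filter_cons, hjc, hdc] <;> first | ring1 | (split_ifs <;> simp <;> ring1) | simp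
    · rw [if_neg h2, if_pos h3]
      rw [if_neg (show ¬(d ∣ j ∧ d ≠ j ∧ j = c) by tauto),
        if_neg (show ¬(d ∣ j ∧ d ≠ j ∧ d = c) by tauto),
        if_congr (show (d ∣ j ∧ j/d ≠ d ∧ j/d ≠ j ∧ j = c) ↔ (j = c) by tauto) rfl rfl,
        if_congr (show (d ∣ j ∧ j/d ≠ d ∧ j/d ≠ j ∧ j/d = c) ↔ (j/d = c) by tauto) rfl rfl]
      by_cases hjc : j = c <;> by_cases hec : j/d = c <;>
        simp [List.filter_cons, hjc, hec] <;> first | ring1 | (split_ifs <;> simp <;> ring1) | simp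
    · rw [if_neg h2, if_neg h3]
      rw [if_neg (show ¬(d ∣ j ∧ d ≠ j ∧ j = c) by tauto),
        if_neg (show ¬(d ∣ j ∧ d ≠ j ∧ d = c) by tauto),
        if_neg (show ¬(d ∣ j ∧ j/d ≠ d ∧ j/d ≠ j ∧ j = c) by tauto),
        if_neg (show ¬(d ∣ j ∧ j/d ≠ d ∧ j/d ≠ j ∧ j/d = c) by tauto)]
      simp
  · have hnd : ¬ d ∣ j := fun hh => h1 ((PySem.Int.mod_eq_zero_iff_dvd j d).mpr hh)
    rw [if_neg h1]
    simp [hnd]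

-- the two "c is the small side" contributions over one j add up to the multiple test
theorem Y_combine (f : Int → Int) (j c : Int) (hj : 1 ≤ j) (hc : 1 ≤ c) :
    (if c ∈ sqL j ∧ (c ∣ j ∧ c ≠ j) then f j else 0)
    + (if j/c ∈ sqL j ∧ (c ∣ j ∧ c ≠ j ∧ c ≠ j/c) then f j else 0)
    = (if c ∣ j ∧ c ≠ j then f j else 0) := by
  by_cases hcd : c ∣ j ∧ c ≠ j
  · obtain ⟨hp1, hp2, hp3, hp4, hp5⟩ := div_pair hj hc hcd.1
    by_cases hcc : c * c ≤ j
    · rw [if_pos ⟨(mem_sqL j c).mpr ⟨hc, hcc⟩, hcd⟩, if_pos hcd]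
      have hnb : ¬(j/c ∈ sqL j ∧ (c ∣ j ∧ c ≠ j ∧ c ≠ j/c)) := by
        rintro ⟨hmem, _, _, hne⟩
        have hm2 := ((mem_sqL j (j/c)).mp hmem).2
        have h1 : j/c ≤ c := by nlinarith
        have h2 : c ≤ j/c := by nlinarith
        omega
      rw [if_neg hnb]
      ring
    · have hmb : j/c ∈ sqL j := (mem_sqL j (j/c)).mpr ⟨hp1, by nlinarith⟩
      have hne : c ≠ j/c := by
        intro h
        exact hcc (le_of_eq (by nlinarith))
      rw [if_neg (fun hh => hcc ((mem_sqL j c).mp hh.1).2),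
        if_pos ⟨hmb, hcd.1, hcd.2, hne⟩, if_pos hcd]
      ring
  · rw [if_neg (by tauto), if_neg (by tauto), if_neg hcd]
    ring

-- one j's events, filtered at cell c
theorem Sj_eq (f : Int → Int) (j c : Int) (hj : 1 ≤ j) (hc : 1 ≤ c) :
    ((((sqL j).flatMap (evD f j)).filter (fun e => e.1 == c)).map (·.2)).sum
    = (if j = c then
         ((sqL j).map (fun d => if d ∣ j ∧ d ≠ j then f d else 0)).sum
         + ((sqL j).map (fun d => if d ∣ j ∧ j/d ≠ d ∧ j/d ≠ j then f (j/d) else 0)).sum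
       else 0)
      + (if c ∣ j ∧ c ≠ j then f j else 0) := by
  rw [sum_map_filter_flatMap]
  rw [List.map_congr_left (fun d hd => evD_cell f j d c ((mem_sqL j d).mp hd).1)]
  have hsplit : ∀ d : Int,
      (if d ∣ j ∧ d ≠ j ∧ j = c then f d else 0)
      + (if d ∣ j ∧ d ≠ j ∧ d = c then f j else 0)
      + (if d ∣ j ∧ j/d ≠ d ∧ j/d ≠ j ∧ j = c then f (j/d) else 0)
      + (if d ∣ j ∧ j/d ≠ d ∧ j/d ≠ j ∧ j/d = c then f j else 0)
      = ((if j = c then (if d ∣ j ∧ d ≠ j then f d else 0)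
            + (if d ∣ j ∧ j/d ≠ d ∧ j/d ≠ j then f (j/d) else 0) else 0)
        + ((if d ∣ j ∧ d ≠ j ∧ d = c then f j else 0)
            + (if d ∣ j ∧ j/d ≠ d ∧ j/d ≠ j ∧ j/d = c then f j else 0))) := by
    intro d
    by_cases hjc : j = c <;> simp [hjc] <;> ring
  rw [List.map_congr_left (fun d _ => hsplit d), PySem.List.sum_map_add_int]
  congr 1
  · by_cases hjc : j = c
    · simp only [if_pos hjc]
      rw [PySem.List.sum_map_add_int]
    · simp only [if_neg hjc]
      rw [PySem.List.sum_map_const_int]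
      ring
  · rw [PySem.List.sum_map_add_int]
    have hY1 : ((sqL j).map (fun d => if d ∣ j ∧ d ≠ j ∧ d = c then f j else 0)).sum
        = if c ∈ sqL j ∧ (c ∣ j ∧ c ≠ j) then f j else 0 := by
      rw [List.map_congr_left (fun d _ => if_congr
        (show (d ∣ j ∧ d ≠ j ∧ d = c) ↔ (d = c ∧ (c ∣ j ∧ c ≠ j)) by
          constructor
          · rintro ⟨a1, a2, rfl⟩; exact ⟨rfl, a1, a2⟩
          · rintro ⟨rfl, a1, a2⟩; exact ⟨a1, a2, rfl⟩)
        rfl rfl)]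
      exact sum_ite_eq_mem _ (nodup_sqL j) c _ (f j)
    have hY2 : ((sqL j).map (fun d => if d ∣ j ∧ j/d ≠ d ∧ j/d ≠ j ∧ j/d = c then f j else 0)).sum
        = if j/c ∈ sqL j ∧ (c ∣ j ∧ c ≠ j ∧ c ≠ j/c) then f j else 0 := by
      rw [List.map_congr_left (fun d hd => if_congr
        (show (d ∣ j ∧ j/d ≠ d ∧ j/d ≠ j ∧ j/d = c) ↔ (d = j/c ∧ (c ∣ j ∧ c ≠ j ∧ c ≠ j/c)) by
          have hd1 : 1 ≤ d := ((mem_sqL j d).mp hd).1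
          constructor
          · rintro ⟨h1, h2, h3, h4⟩
            obtain ⟨q1, q2, q3, q4, q5⟩ := div_pair hj hd1 h1
            rw [h4] at q4 q5 h2 h3
            refine ⟨q5.symm, ⟨d, by rw [← q4]; ring⟩, h3, ?_⟩
            rw [q5]
            exact h2
          · rintro ⟨rfl, h1, h2, h3⟩
            obtain ⟨q1, q2, q3, q4, q5⟩ := div_pair hj hc h1
            refine ⟨q3, by rw [q5]; exact h3, by rw [q5]; exact h2, q5⟩)
        rfl rfl)]
      exact sum_ite_eq_mem _ (nodup_sqL j) (j/c) _ (f j)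
    rw [hY1, hY2]
    exact Y_combine f j c hj hc

-- the sqrt-pair walk over j = c enumerates exactly the proper divisors of c
theorem Xc_eq (m : Int) (f : Int → Int) (c : Int) (hc : 1 ≤ c) (hcm : c ≤ m) :
    ((sqL c).map (fun d => if d ∣ c ∧ d ≠ c then f d else 0)).sum
    + ((sqL c).map (fun d => if d ∣ c ∧ c/d ≠ d ∧ c/d ≠ c then f (c/d) else 0)).sum
    = dSum m f c := by
  rw [ite_sum_list _ (nodup_sqL c) _ f,
    ite_sum_list _ (nodup_sqL c) _ (fun d => f (c/d)),
    toFinset_sqL, dSum_finset]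
  have hset : (Finset.Icc 1 m).filter (fun a => a ∣ c ∧ a ≠ c)
      = (Finset.Icc 1 c).filter (fun a => a ∣ c ∧ a ≠ c) := by
    ext a
    simp only [Finset.mem_filter, Finset.mem_Icc]
    constructor
    · rintro ⟨⟨h1, _⟩, h2, h3⟩
      exact ⟨⟨h1, Int.le_of_dvd (by omega) h2⟩, h2, h3⟩
    · rintro ⟨⟨h1, h2⟩, h3, h4⟩
      exact ⟨⟨h1, by omega⟩, h3, h4⟩
  rw [hset,
    ← Finset.sum_filter_add_sum_filter_not ((Finset.Icc 1 c).filter (fun a => a ∣ c ∧ a ≠ c))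
      (fun a => a * a ≤ c) f]
  congr 1
  · rw [Finset.filter_filter, Finset.filter_filter]
    apply Finset.sum_congr _ (fun _ _ => rfl)
    ext a
    simp only [Finset.mem_filter, Finset.mem_Icc]
    tauto
  · rw [Finset.filter_filter, Finset.filter_filter]
    refine Finset.sum_nbij' (fun d => c / d) (fun a => c / a) ?_ ?_ ?_ ?_ ?_
    · intro d hd
      simp only [Finset.mem_filter, Finset.mem_Icc, not_le] at hd ⊢
      obtain ⟨⟨hd1, hd2⟩, hsq, hdvd, hne1, hne2⟩ := hd
      obtain ⟨q1, q2, q3, q4, q5⟩ := div_pair hc hd1 hdvd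
      refine ⟨⟨q1, q2⟩, ⟨q3, hne2⟩, ?_⟩
      by_contra hle
      push_neg at hle
      have h1 : c/d ≤ d := by nlinarith
      have h2 : d ≤ c/d := by nlinarith
      exact hne1 (by linarith)
    · intro a ha
      simp only [Finset.mem_filter, Finset.mem_Icc, not_le] at ha ⊢
      obtain ⟨⟨ha1, ha2⟩, ⟨hdvd, hne⟩, hbig⟩ := ha
      obtain ⟨q1, q2, q3, q4, q5⟩ := div_pair hc ha1 hdvd
      have hlt : c/a < a := by nlinarith
      refine ⟨⟨q1, q2⟩, by nlinarith, q3, ?_, ?_⟩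
      · rw [q5]
        intro h
        linarith
      · rw [q5]
        exact hne
    · intro d hd
      simp only [Finset.mem_filter, Finset.mem_Icc] at hd
      obtain ⟨⟨hd1, _⟩, _, hdvd, _, _⟩ := hd
      exact (div_pair hc hd1 hdvd).2.2.2.2
    · intro a ha
      simp only [Finset.mem_filter, Finset.mem_Icc, not_le] at ha
      obtain ⟨⟨ha1, _⟩, ⟨hdvd, _⟩, _⟩ := ha
      exact (div_pair hc ha1 hdvd).2.2.2.2
    · intro d _
      rfl

-- one layer's events, per cell
theorem eB_cell (m : Int) (f : Int → Int) (c : Int) (hc : 1 ≤ c) (hcm : c ≤ m) :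
    (((eB m f).filter (fun e => e.1 == c)).map (·.2)).sum = dSum m f c + uSum m f c := by
  rw [eB, sum_map_filter_flatMap]
  rw [List.map_congr_left (fun j hj =>
    Sj_eq f j c (PySem.List.mem_pyRange_one.mp hj).1 hc)]
  rw [PySem.List.sum_map_add_int]
  have hcmem : c ∈ PySem.List.pyRange 1 (m+1) 1 :=
    PySem.List.mem_pyRange_one.mpr ⟨hc, by omega⟩
  congr 1
  · rw [sum_map_ite_eq_of_nodup _ c _ (PySem.List.nodup_pyRange_one _ _) hcmem]
    exact Xc_eq m f c hc hcm
  · rw [List.map_congr_left (fun j _ => if_congr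
      (show (c ∣ j ∧ c ≠ j) ↔ (c ∣ j ∧ j ≠ c) by constructor <;> (rintro ⟨a1, a2⟩; exact ⟨a1, fun h => a2 h.symm⟩))
      rfl rfl)]
    rw [uSum]

-- one layer of B computes nstep at every cell of [1..m]
theorem bLayer_char (m : Int) (v : Array Int) (hm1 : 1 ≤ m) (hv : v.size = (m+1).toNat) :
    (bLayer m v).size = (m+1).toNat ∧
    ∀ c, 1 ≤ c → c ≤ m → rget (bLayer m v) c = nstep m (rget v) c := by
  have hvi : (v.size : Int) = m + 1 := by rw [hv]; omega
  have hb : ∀ e ∈ eB m (rget v), 0 ≤ e.1 ∧ e.1 < (v.size : Int) := by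
    intro e he
    have := eB_bounds m (rget v) e he
    omega
  have hshape : bLayer m v = (eB m (rget v)).foldl
      (fun r e => rset r e.1 (rget r e.1 + e.2)) v := bLayer_eq m v
  constructor
  · rw [hshape, foldl_rbump_size, hv]
  · intro c hc1 hcm
    rw [hshape, foldl_rbump_read _ _ hb c (by omega),
      eB_cell m (rget v) c hc1 hcm, nstep]
    ring

-- replicate reads
theorem rget_replicate (N : Nat) (x c : Int) (h0 : 0 ≤ c) (hc : c < (N : Int)) :
    rget (Array.replicate N x) c = x := by
  rw [rget, Array.size_replicate, pyIdx_nonneg _ _ h0, Array.getElem?_replicate,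
    if_pos (by omega), Option.getD_some]

theorem rget_replicate_zero (c : Int) : rget (Array.replicate 1000 (0:Int)) c = 0 := by
  rw [rget, Array.getElem?_replicate]
  split <;> rfl

theorem aget_replicate (r : Array Int) (i : Int) (h0 : 0 ≤ i) (hi : i < 1000) :
    aget (Array.replicate 1000 r) i = r := by
  rw [aget, Array.size_replicate, pyIdx_nonneg _ _ h0, Array.getElem?_replicate,
    if_pos (by omega), Option.getD_some]

theorem aget_neg_shift (t : Array (Array Int)) (hsz : t.size = 1000) (n : Int)
    (h0 : -1000 ≤ n) (hn : n < 0) : aget t n = aget t (n + 1000) := by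
  have : pyIdx t.size n = pyIdx t.size (n + 1000) := by
    rw [pyIdx, pyIdx, hsz, if_pos (by omega), if_neg (by omega)]
    omega
  rw [aget, aget, this]

-- ===== B computes valM =====
theorem vecChar (m : Int) (hm1 : 1 ≤ m) :
    ∀ k : Nat,
      ((PySem.List.pyRange 0 (k:Int) 1).foldl (fun v _ => bLayer m v)
        (Array.replicate (m+1).toNat 1)).size = (m+1).toNat ∧
      ∀ c, 1 ≤ c → c ≤ m →
        rget ((PySem.List.pyRange 0 (k:Int) 1).foldl (fun v _ => bLayer m v)
          (Array.replicate (m+1).toNat 1)) c = valM m k c := by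
  intro k
  induction k with
  | zero =>
    rw [show ((0:Nat):Int) = 0 from rfl, PySem.List.pyRange_one_eq_nil (le_refl 0)]
    simp only [List.foldl_nil]
    refine ⟨Array.size_replicate, fun c hc1 hcm => ?_⟩
    rw [rget_replicate _ _ _ (by omega) (by omega)]
    rfl
  | succ k ih =>
    have hcast : ((k+1 : Nat) : Int) = (k:Int) + 1 := by push_cast; ring
    rw [hcast, PySem.List.pyRange_one_succ_right (by omega : (0:Int) ≤ (k:Int)),
      List.foldl_append, List.foldl_cons, List.foldl_nil]
    obtain ⟨ihs, ihv⟩ := ih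
    obtain ⟨hs, hval⟩ := bLayer_char m _ hm1 ihs
    refine ⟨hs, fun c hc1 hcm => ?_⟩
    rw [hval c hc1 hcm,
      show valM m (k+1) c = nstep m (valM m k) c from rfl]
    exact nstep_congr m _ _ c hc1 hcm (fun a h1 h2 => ihv a h1 h2)

theorem B_val (n m : Int) (hn1 : 1 ≤ n) (hm1 : 1 ≤ m) :
    numofArray_alt n m
      = (PySem.List.pyRange 1 (m+1) 1).foldl (fun total c => total + valM m (n-1).toNat c) 0 := by
  simp only [numofArray_alt]
  rw [if_neg (by omega : ¬(n ≤ 0 ∨ m ≤ 0))]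
  rw [show PySem.List.pyRange 0 (n-1) 1 = PySem.List.pyRange 0 (((n-1).toNat : Int)) 1 by
    congr 1; omega]
  refine PySem.List.foldl_congr_mem _ _ _ _ (fun acc c hc => ?_)
  have hcb := PySem.List.mem_pyRange_one.mp hc
  rw [(vecChar m hm1 (n-1).toNat).2 c hcb.1 (by omega)]

-- ===== A computes valM =====
def bodyA (m : Int) (di mu : List (List Int))
    (dp : Array (Array Int)) (i : Int) : Array (Array Int) :=
  (PySem.List.pyRange 1 (m+1) 1).foldl (fun dp j =>
    let dp := tset dp i j 0
    let dp := (lget di j).foldl (fun dp x => tset dp i j (tget dp i j + tget dp (i-1) x)) dp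
    (lget mu j).foldl (fun dp x => tset dp i j (tget dp i j + tget dp (i-1) x)) dp) dp

def TinitD (m : Int) : Array (Array Int) :=
  (PySem.List.pyRange 1 (m+1) 1).foldl (fun dp i => tset dp 1 i 1)
    (Array.replicate 1000 (Array.replicate 1000 0))

def row1 (m : Int) : Array Int :=
  (PySem.List.pyRange 1 (m+1) 1).foldl (fun r i => rset r i 1) (Array.replicate 1000 0)

theorem Tinit_eq (m : Int) :
    TinitD m = aset (Array.replicate 1000 (Array.replicate 1000 0)) 1 (row1 m) := by
  rw [TinitD]
  rw [show (fun (dp : Array (Array Int)) (i : Int) => tset dp 1 i 1)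
      = (fun (t : Array (Array Int)) (a : Int) =>
          aset t 1 ((fun (r q : Array Int) (a : Int) => rset r a 1) (aget t 1) (aget t (1-1)) a))
      from rfl]
  rw [foldl_aset_collapse _ _ 1 (le_refl 1)
    (by rw [Array.size_replicate]; omega) (fun (r q : Array Int) (a : Int) => rset r a 1)]
  rw [aget_replicate _ _ (by omega) (by omega), row1]

theorem Tinit_shape (m : Int) (hm : m ≤ 999) : Shape (TinitD m) := by
  rw [TinitD]; exact shape_init m hm

theorem row1_val (m : Int) (hm : m ≤ 999) (c : Int) (hc : 0 ≤ c) :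
    rget (row1 m) c = if 1 ≤ c ∧ c ≤ m then 1 else 0 := by
  rw [row1]
  rw [foldl_rstore_read _ (fun _ => (1:Int)) _
    (fun x hx => by
      have := PySem.List.mem_pyRange_one.mp hx
      rw [Array.size_replicate]
      constructor <;> omega)
    (PySem.List.nodup_pyRange_one _ _) c hc]
  by_cases hin : 1 ≤ c ∧ c < m + 1
  · rw [if_pos (PySem.List.mem_pyRange_one.mpr hin), if_pos (by omega)]
  · rw [if_neg (fun h => hin (PySem.List.mem_pyRange_one.mp h)), rget_replicate_zero,
      if_neg (by omega)]

theorem aget_Tinit_one (m : Int) : aget (TinitD m) 1 = row1 m := by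
  rw [Tinit_eq]
  exact aget_aset_self _ _ _ (by omega) (by rw [Array.size_replicate]; omega)

theorem aget_Tinit (m : Int) (i : Int) (h0 : 0 ≤ i) (hi : i ≤ 999) (hne : i ≠ 1) :
    aget (TinitD m) i = Array.replicate 1000 0 := by
  rw [Tinit_eq, aget_aset_ne _ _ _ _ (by omega) (by rw [Array.size_replicate]; omega) h0 hne]
  exact aget_replicate _ _ h0 (by omega)

theorem tableChar (m : Int) (hm1 : 1 ≤ m) (hm : m ≤ 999)
    (di mu : List (List Int))
    (hdi : ∀ c, 0 ≤ c → lget di c = ((eDi m).filter (fun e => e.1 == c)).map (·.2))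
    (hmu : ∀ c, 0 ≤ c → lget mu c = ((eMu m).filter (fun e => e.1 == c)).map (·.2)) :
    ∀ (k : Nat), (k : Int) ≤ 998 →
      Shape ((PySem.List.pyRange 2 ((k:Int)+2) 1).foldl (bodyA m di mu) (TinitD m))
      ∧ (∀ i : Int, (k:Int)+2 ≤ i → i ≤ 999 →
          aget ((PySem.List.pyRange 2 ((k:Int)+2) 1).foldl (bodyA m di mu) (TinitD m)) i
            = Array.replicate 1000 0)
      ∧ (∀ c : Int, 0 ≤ c → c ≤ 999 →
          tget ((PySem.List.pyRange 2 ((k:Int)+2) 1).foldl (bodyA m di mu) (TinitD m)) ((k:Int)+1) c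
            = if 1 ≤ c ∧ c ≤ m then valM m k c else 0) := by
  intro k
  induction k with
  | zero =>
    intro _
    rw [show ((0:Nat):Int) + 2 = 2 from rfl, PySem.List.pyRange_one_eq_nil (le_refl 2)]
    simp only [List.foldl_nil]
    refine ⟨Tinit_shape m hm, fun i h1 h2 => aget_Tinit m i (by omega) h2 (by omega),
      fun c h0 h9 => ?_⟩
    rw [show ((0:Nat):Int) + 1 = 1 from rfl, tget, aget_Tinit_one m, row1_val m hm c h0]
    rfl
  | succ k ih =>
    intro hk
    obtain ⟨ihS, ihZ, ihV⟩ := ih (by omega)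
    have hc1 : ((k+1 : Nat) : Int) = (k:Int) + 1 := by push_cast; ring
    rw [hc1]
    have hr : PySem.List.pyRange 2 ((k:Int)+1+2) 1
        = PySem.List.pyRange 2 ((k:Int)+2) 1 ++ [(k:Int)+2] := by
      rw [show (k:Int)+1+2 = ((k:Int)+2)+1 by ring,
        PySem.List.pyRange_one_succ_right (by omega)]
    rw [hr, List.foldl_append, List.foldl_cons, List.foldl_nil]
    set T := (PySem.List.pyRange 2 ((k:Int)+2) 1).foldl (bodyA m di mu) (TinitD m) with hT
    have hTsz : (T.size : Int) = 1000 := by rw [ihS.1]; rfl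
    have hprev : ∀ a : Int, 1 ≤ a → a ≤ m → rget (aget T ((k:Int)+1)) a = valM m k a := by
      intro a h1 h2
      have := ihV a (by omega) (by omega)
      rw [tget] at this
      rw [this, if_pos ⟨h1, h2⟩]
    have hbody : bodyA m di mu T ((k:Int)+2) = aset T ((k:Int)+2)
        ((PySem.List.pyRange 1 (m+1) 1).foldl
          (fun r j => rset r j (AvalF m (aget T ((k:Int)+1)) j)) (aget T ((k:Int)+2))) := by
      rw [bodyA]
      have := bodyA_eq m T ((k:Int)+2) ihS (by omega) (by omega) hm di mu hdi hmu
      simp only [show (k:Int)+2-1 = (k:Int)+1 from by ring] at this ⊢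
      exact this
    rw [hbody]
    have hrowsz : ((PySem.List.pyRange 1 (m+1) 1).foldl
        (fun r j => rset r j (AvalF m (aget T ((k:Int)+1)) j)) (aget T ((k:Int)+2))).size
        = 1000 := by
      rw [foldl_rstore_size _ (AvalF m (aget T ((k:Int)+1))) _]
      exact aget_size _ _ ihS (by omega) (by omega)
    refine ⟨shape_aset _ _ _ ihS hrowsz, ?_, ?_⟩
    · intro i h1 h2
      rw [aget_aset_ne _ _ _ _ (by omega) (by omega) (by omega) (by omega)]
      exact ihZ i (by omega) h2
    · intro c h0 h9
      rw [show (k:Int)+1+1 = (k:Int)+2 by ring, tget,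
        aget_aset_self _ _ _ (by omega) (by omega)]
      rw [foldl_rstore_read _ (AvalF m (aget T ((k:Int)+1))) _
        (fun x hx => by
          have := PySem.List.mem_pyRange_one.mp hx
          rw [aget_size _ _ ihS (by omega) (by omega)]
          constructor <;> omega)
        (PySem.List.nodup_pyRange_one _ _) c h0]
      rw [ihZ ((k:Int)+2) (by omega) (by omega), rget_replicate_zero]
      by_cases hin : 1 ≤ c ∧ c < m + 1
      · rw [if_pos (PySem.List.mem_pyRange_one.mpr hin), if_pos (by omega)]
        rw [show AvalF m (aget T ((k:Int)+1)) c = AvalP m (rget (aget T ((k:Int)+1))) c from rfl]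
        rw [AvalP_eq m _ c (by omega) (by omega)]
        rw [show valM m (k+1) c = nstep m (valM m k) c from rfl]
        exact nstep_congr m _ _ c (by omega) (by omega) hprev
      · rw [if_neg (fun h => hin (PySem.List.mem_pyRange_one.mp h)), if_neg (by omega)]

-- A's value on the main domain
set_option maxHeartbeats 1000000 in
theorem A_val (n m : Int) (hn1 : 1 ≤ n) (hn : n ≤ 999) (hm1 : 1 ≤ m) (hm : m ≤ 999) :
    numofArray n m
      = (PySem.List.pyRange 1 (m+1) 1).foldl (fun a c => a + valM m (n-1).toNat c) 0 := by
  simp only [numofArray]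
  rw [cons_split m, foldl_proj1]
  set k := (n-1).toNat with hkdef
  have hki : (k : Int) = n - 1 := by omega
  have hchar := tableChar m hm1 hm _ _
    (fun c hc => (lget_cons m hm c hc).1)
    (fun c hc => (lget_cons m hm c hc).2)
    k (by omega)
  rw [show n + 1 = (k:Int) + 2 by omega]
  refine PySem.List.foldl_congr_mem _ _ _ _ (fun acc c hc => ?_)
  have hcb := PySem.List.mem_pyRange_one.mp hc
  have := hchar.2.2 c (by omega) (by omega)
  rw [show (k:Int) + 1 = n by omega] at this
  rw [show (PySem.List.pyRange 2 ((k:Int)+2) 1).foldl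
      (bodyA m ((eDi m).foldl (fun t e => lset t e.1 (lget t e.1 ++ [e.2])) (List.replicate 1000 []))
        ((eMu m).foldl (fun t e => lset t e.1 (lget t e.1 ++ [e.2])) (List.replicate 1000 [])))
      (TinitD m)
      = (PySem.List.pyRange 2 ((k:Int)+2) 1).foldl
        (fun dp i => (PySem.List.pyRange 1 (m+1) 1).foldl (fun dp j =>
          let dp := tset dp i j 0
          let dp := (lget ((eDi m).foldl (fun t e => lset t e.1 (lget t e.1 ++ [e.2]))
              (List.replicate 1000 [])) j).foldl
            (fun dp x => tset dp i j (tget dp i j + tget dp (i-1) x)) dp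
          (lget ((eMu m).foldl (fun t e => lset t e.1 (lget t e.1 ++ [e.2]))
              (List.replicate 1000 [])) j).foldl
            (fun dp x => tset dp i j (tget dp i j + tget dp (i-1) x)) dp)
          dp)
        ((PySem.List.pyRange 1 (m+1) 1).foldl (fun dp i => tset dp 1 i 1)
          (Array.replicate 1000 (Array.replicate 1000 0)))
      from rfl] at this
  rw [this, if_pos (by omega : 1 ≤ c ∧ c ≤ m)]

-- A's value for m ≤ 0: every loop over [1..m] is empty
theorem A_m0 (n m : Int) (hm : m ≤ 0) : numofArray n m = 0 := by
  have h0 : PySem.List.pyRange 1 (m+1) 1 = [] := PySem.List.pyRange_one_eq_nil (by omega)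
  simp only [numofArray, h0, List.foldl_nil, PySem.List.foldl_ignore]

-- A's value for -1000 ≤ n ≤ 0 with 1 ≤ m: the DP loop is empty and dp[n] wraps around
theorem A_neg (n m : Int) (hm1 : 1 ≤ m) (hm : m ≤ 999) (hn0 : -1000 ≤ n) (hn : n ≤ 0) :
    numofArray n m = if n = -999 then m else 0 := by
  simp only [numofArray]
  rw [cons_split m, PySem.List.pyRange_one_eq_nil (by omega : n + 1 ≤ 2)]
  simp only [List.foldl_nil]
  rw [foldl_proj1]
  rw [show ((PySem.List.pyRange 1 (m+1) 1).foldl (fun dp i => tset dp 1 i 1)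
      (Array.replicate 1000 (Array.replicate 1000 0))) = TinitD m from rfl]
  by_cases hneg : n = -999
  · subst hneg
    have hrow : aget (TinitD m) (-999) = row1 m := by
      rw [aget_neg_shift (TinitD m) (Tinit_shape m hm).1 (-999) (by omega) (by omega)]
      rw [show (-999 : Int) + 1000 = 1 by ring]
      exact aget_Tinit_one m
    rw [if_pos rfl]
    rw [PySem.List.foldl_congr_mem _ _ (fun (a : Int) (c : Int) => a + 1) _
      (fun acc c hc => by
        have hcb := PySem.List.mem_pyRange_one.mp hc
        rw [tget, hrow, row1_val m hm c (by omega), if_pos (by omega)])]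
    rw [PySem.List.foldl_add _ (fun _ => (1:Int)) 0, PySem.List.sum_map_const_int,
      PySem.List.length_pyRange_one]
    omega
  · have hrow : aget (TinitD m) n = Array.replicate 1000 0 := by
      by_cases hz : n = 0
      · subst hz; exact aget_Tinit m 0 (by omega) (by omega) (by omega)
      · rw [aget_neg_shift (TinitD m) (Tinit_shape m hm).1 n (by omega) (by omega)]
        exact aget_Tinit m (n + 1000) (by omega) (by omega) (by omega)
    rw [if_neg hneg]
    rw [PySem.List.foldl_congr_mem _ _ (fun (a : Int) (c : Int) => a + 0) _
      (fun acc c hc => by rw [tget, hrow, rget_replicate_zero])]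
    rw [PySem.List.foldl_add _ (fun _ => (0:Int)) 0, PySem.List.sum_map_const_int]
    ring

-- B's value outside the positive domain
theorem B_zero (n m : Int) (h : n ≤ 0 ∨ m ≤ 0) : numofArray_alt n m = 0 := by
  simp only [numofArray_alt]
  rw [if_pos h]

-- ===== VERDICT (by name: the statements are the Claim_ definitions above) =====
theorem numofArray_spec : Claim_unchanged_numofArray := by
  unfold Claim_unchanged_numofArray
  intro n m _ hPre
  unfold Spec_numofArray
  intro hnD
  obtain ⟨hm999, hpos⟩ := hPre
  by_cases hm1 : 1 ≤ m
  · obtain ⟨hn0, hn999⟩ := hpos hm1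
    by_cases hn1 : 1 ≤ n
    · rw [A_val n m hn1 hn999 hm1 hm999, B_val n m hn1 hm1]
    · have hne : n ≠ -999 := fun h => hnD ⟨h, hm1⟩
      rw [A_neg n m hm1 hm999 hn0 (by omega), if_neg hne, B_zero n m (Or.inl (by omega))]
  · rw [A_m0 n m (by omega), B_zero n m (Or.inr (by omega))]

theorem numofArray_changed : Claim_changed_numofArray := by
  unfold Claim_changed_numofArray
  refine ⟨by decide, by decide, by decide, ?_, ?_, by decide⟩
  · show numofArray (-999) 1 = 1
    rw [A_neg (-999) 1 (by omega) (by omega) (by omega) (by omega), if_pos rfl]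
  · show numofArray_alt (-999) 1 = 0
    exact B_zero _ _ (Or.inl (by omega))

theorem numofArray_tight : Claim_exact_numofArray := by
  unfold Claim_exact_numofArray
  intro n m _ hPre hD
  obtain ⟨hneg, hm1⟩ := hD
  obtain ⟨hm999, _⟩ := hPre
  subst hneg
  rw [A_neg (-999) m hm1 hm999 (by omega) (by omega), if_pos rfl,
    B_zero (-999) m (Or.inl (by omega))]
  omega
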